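-- pv_equiv track=rewrite | github.com/adriaan29A/mobyx | src/moby.py | process_cmdline
-- ===== SOURCE A (Python) =====
-- def process_cmdline(cmdline, pre_or_post_flag):
--     res = ''
--     p = pre_or_post_flag
--     q = False # q flips on begin/end a quoted piece of text
--     for c in cmdline:
--         q = not q if c == '\'' else q
--         c = '.' if (c == ' ' and q and p) else ' ' if (c == '.' and q and not p) else c
--         res += c
--     return res
-- ===== SOURCE B (Python) =====
-- def process_cmdline(cmdline, pre_or_post_flag):
--     # Segments at odd indices of split("'") are inside quotes; transform those.
--     parts = cmdline.split("'")
--     fixed = [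
--         ((seg.replace(' ', '.') if pre_or_post_flag else seg.replace('.', ' '))
--          if i % 2 == 1 else seg)
--         for i, seg in enumerate(parts)
--     ]
--     return "'".join(fixed)
-- ===== Notes on version B (the rewrite author's own statement) =====
-- stated objective: faster
-- what changed: Replaces the char-by-char quote-toggling state machine (with quadratic string += accumulation) by a split on the quote character, replace() on the odd-indexed (inside-quote) segments, and a join.
import Mathlib
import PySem

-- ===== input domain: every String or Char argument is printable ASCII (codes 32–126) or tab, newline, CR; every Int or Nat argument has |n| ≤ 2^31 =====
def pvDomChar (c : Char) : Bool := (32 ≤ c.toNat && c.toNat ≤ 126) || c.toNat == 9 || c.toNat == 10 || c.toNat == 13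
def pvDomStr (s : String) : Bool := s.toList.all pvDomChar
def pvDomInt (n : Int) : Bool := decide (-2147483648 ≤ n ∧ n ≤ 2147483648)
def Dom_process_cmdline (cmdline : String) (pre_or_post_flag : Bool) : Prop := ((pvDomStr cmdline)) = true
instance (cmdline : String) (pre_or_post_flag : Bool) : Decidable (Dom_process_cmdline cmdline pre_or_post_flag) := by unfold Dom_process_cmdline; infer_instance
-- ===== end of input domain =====

-- B replaces A's char-by-char quote-toggling state machine by split-on-quote /
-- replace-in-odd-segments / join (idiomatic; return value only, no mutation).


-- ===== PORT A =====
-- literal port of A: fold over the characters with state (q, res)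
def process_cmdline (cmdline : String) (pre_or_post_flag : Bool) : String :=
  let p := pre_or_post_flag
  let step : (Bool × List Char) → Char → (Bool × List Char) := fun st c =>
    let q := if c = '\'' then !st.1 else st.1
    let c' := if c = ' ' ∧ q = true ∧ p = true then '.'
              else if c = '.' ∧ q = true ∧ p = false then ' '
              else c
    (q, st.2 ++ [c'])
  String.mk (cmdline.toList.foldl step (false, [])).2

-- ===== PORT B =====
-- literal port of B: split on the quote, transform odd-indexed segments, join
def process_cmdline_alt (cmdline : String) (pre_or_post_flag : Bool) : String :=
  let parts := PySem.Chars.splitOn cmdline.toList ['\'']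
  let fixed := (PySem.List.enumerate parts).map (fun iseg =>
    if PySem.Int.mod iseg.1 2 = 1 then
      (if pre_or_post_flag then PySem.Chars.replace iseg.2 [' '] ['.']
       else PySem.Chars.replace iseg.2 ['.'] [' '])
    else iseg.2)
  String.mk (PySem.Chars.join ['\''] fixed)

-- ===== PRECONDITION & SPEC =====
def Spec_process_cmdline (cmdline : String) (pre_or_post_flag : Bool) (out : String) : Prop := out = process_cmdline_alt cmdline pre_or_post_flag
instance (cmdline : String) (pre_or_post_flag : Bool) (out : String) : Decidable (Spec_process_cmdline cmdline pre_or_post_flag out) := by unfold Spec_process_cmdline; infer_instance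

-- ===== CLAIM (what is proved, stated in full; the proofs are below) =====
def Claim_equal_process_cmdline : Prop := ∀ (cmdline : String) (pre_or_post_flag : Bool), Dom_process_cmdline cmdline pre_or_post_flag → Spec_process_cmdline cmdline pre_or_post_flag (process_cmdline cmdline pre_or_post_flag)

-- ===== LEMMAS AND PROOFS =====

-- the per-character transformation applied inside quotes
def pvTr (p : Bool) (c : Char) : Char :=
  if p then (if c = ' ' then '.' else c) else (if c = '.' then ' ' else c)

-- recursive model of A's loop (result only, state q threaded)
def pvA (p : Bool) : Bool → List Char → List Char
  | _, [] => []
  | q, c :: cs =>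
    let q' := if c = '\'' then !q else q
    (if q' then pvTr p c else c) :: pvA p q' cs

-- simple model of split on a single character
def pvSplit1 (sep : Char) : List Char → List (List Char)
  | [] => [[]]
  | c :: cs =>
    if c = sep then [] :: pvSplit1 sep cs
    else
      match pvSplit1 sep cs with
      | [] => [[c]]
      | x :: xs => (c :: x) :: xs

-- alternating join model
def pvCombine (p : Bool) : Bool → List (List Char) → List Char
  | _, [] => []
  | q, [x] => if q then x.map (pvTr p) else x
  | q, x :: y :: rest =>
    (if q then x.map (pvTr p) else x) ++ '\'' :: pvCombine p (!q) (y :: rest)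

theorem pvSplit1_ne_nil (sep : Char) (l : List Char) : pvSplit1 sep l ≠ [] := by
  induction l with
  | nil => simp [pvSplit1]
  | cons c cs ih =>
    simp only [pvSplit1]
    split
    · simp
    · cases h : pvSplit1 sep cs with
      | nil => simp
      | cons x xs => simp

-- A's fold accumulates res ++ pvA
theorem pvA_foldl (p : Bool) (l : List Char) : ∀ (q : Bool) (res : List Char),
    (l.foldl (fun st c =>
      let q := if c = '\'' then !st.1 else st.1
      let c' := if c = ' ' ∧ q = true ∧ p = true then '.'
                else if c = '.' ∧ q = true ∧ p = false then ' '
                else c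
      (q, st.2 ++ [c'])) (q, res)).2 = res ++ pvA p q l := by
  induction l with
  | nil => intro q res; simp [pvA]
  | cons c cs ih =>
    intro q res
    simp only [List.foldl_cons, pvA, ih]
    cases p <;> cases q <;> by_cases hc : c = '\'' <;>
      simp_all [pvTr]

-- A's loop = alternate-transform of the split pieces
theorem pvA_eq_combine (p : Bool) (l : List Char) : ∀ q : Bool,
    pvA p q l = pvCombine p q (pvSplit1 '\'' l) := by
  induction l with
  | nil => intro q; simp [pvA, pvSplit1, pvCombine]
  | cons c cs ih =>
    intro q
    by_cases hc : c = '\''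
    · subst hc
      have h2 : pvSplit1 '\'' cs ≠ [] := pvSplit1_ne_nil _ _
      cases h : pvSplit1 '\'' cs with
      | nil => exact absurd h h2
      | cons x xs =>
        simp only [pvA, pvSplit1, ih, h]
        have htr : pvTr p '\'' = '\'' := by cases p <;> decide
        cases q
        · simp [pvCombine]
          exact htr
        · simp [pvCombine]
    · have h2 : pvSplit1 '\'' cs ≠ [] := pvSplit1_ne_nil _ _
      cases h : pvSplit1 '\'' cs with
      | nil => exact absurd h h2
      | cons x xs =>
        simp only [pvA, pvSplit1, if_neg hc, ih, h]
        cases xs with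
        | nil => cases q <;> simp [pvCombine]
        | cons y ys => cases q <;> simp [pvCombine]

-- PySem.Chars.splitOn on a single-char separator = pvSplit1
theorem pvSplitOn_go (sep : Char) : ∀ (fuel : ℕ) (l cur : List Char) (acc : List (List Char)),
    l.length < fuel →
    PySem.Chars.splitOn.go [sep] fuel l cur acc =
      acc.reverse ++ (match pvSplit1 sep l with
        | [] => [cur.reverse]
        | x :: xs => (cur.reverse ++ x) :: xs) := by
  intro fuel
  induction fuel with
  | zero => intro l cur acc h; omega
  | succ n ih =>
    intro l cur acc h
    cases l with
    | nil => simp [PySem.Chars.splitOn.go, pvSplit1]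
    | cons c rest =>
      by_cases hc : c = sep
      · subst hc
        have hpre : List.isPrefixOf [c] (c :: rest) = true := by simp [List.isPrefixOf]
        rw [PySem.Chars.splitOn.go, if_pos hpre]
        simp only [List.length, List.drop_succ_cons, List.drop_zero] at *
        rw [ih rest [] (cur.reverse :: acc) (by simpa using Nat.lt_of_succ_lt_succ h)]
        have h2 : pvSplit1 c rest ≠ [] := pvSplit1_ne_nil _ _
        cases hs : pvSplit1 c rest with
        | nil => exact absurd hs h2
        | cons x xs => simp [pvSplit1, hs]
      · have hpre : List.isPrefixOf [sep] (c :: rest) = false := by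
          simp [List.isPrefixOf]; exact fun h' => absurd h'.symm hc
        rw [PySem.Chars.splitOn.go, if_neg (by simp [hpre])]
        rw [ih rest (c :: cur) acc (by simpa using Nat.lt_of_succ_lt_succ h)]
        have h2 : pvSplit1 sep rest ≠ [] := pvSplit1_ne_nil _ _
        cases hs : pvSplit1 sep rest with
        | nil => exact absurd hs h2
        | cons x xs => simp [pvSplit1, hc, hs]

theorem pvSplitOn_eq (sep : Char) (l : List Char) :
    PySem.Chars.splitOn l [sep] = pvSplit1 sep l := by
  unfold PySem.Chars.splitOn
  rw [pvSplitOn_go sep (l.length + 1) l [] [] (by omega)]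
  have h2 : pvSplit1 sep l ≠ [] := pvSplit1_ne_nil _ _
  cases hs : pvSplit1 sep l with
  | nil => exact absurd hs h2
  | cons x xs => simp

-- PySem.Chars.replace on single chars = map
theorem pvReplace_go (a b : Char) : ∀ (fuel : ℕ) (l acc : List Char),
    l.length ≤ fuel →
    PySem.Chars.replace.go [a] [b] fuel l acc =
      acc.reverse ++ l.map (fun c => if c = a then b else c) := by
  intro fuel
  induction fuel with
  | zero =>
    intro l acc h
    have : l = [] := List.length_eq_zero_iff.mp (Nat.le_zero.mp h)
    subst this; simp [PySem.Chars.replace.go]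
  | succ n ih =>
    intro l acc h
    cases l with
    | nil => simp [PySem.Chars.replace.go]
    | cons c rest =>
      by_cases hc : c = a
      · subst hc
        have hpre : List.isPrefixOf [c] (c :: rest) = true := by simp [List.isPrefixOf]
        rw [PySem.Chars.replace.go, if_pos hpre]
        simp only [List.length, List.drop_succ_cons, List.drop_zero]
        rw [ih rest ([b].reverse ++ acc) (by simp at h; omega)]
        simp
      · have hpre : List.isPrefixOf [a] (c :: rest) = false := by
          simp [List.isPrefixOf]; exact fun h' => absurd h'.symm hc
        rw [PySem.Chars.replace.go, if_neg (by simp [hpre])]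
        rw [ih rest (c :: acc) (by simp at h; omega)]
        simp [hc]

theorem pvReplace_eq (a b : Char) (l : List Char) :
    PySem.Chars.replace l [a] [b] = l.map (fun c => if c = a then b else c) := by
  unfold PySem.Chars.replace
  rw [if_neg (by simp), pvReplace_go a b l.length l [] (le_refl _)]
  simp

-- join over enumerate = pvCombine
theorem pvJoin_enum (p : Bool) : ∀ (parts : List (List Char)) (n : Int), 0 ≤ n →
    PySem.Chars.join ['\'']
      ((PySem.List.enumerate parts n).map (fun iseg =>
        if PySem.Int.mod iseg.1 2 = 1 then
          (if p then PySem.Chars.replace iseg.2 [' '] ['.']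
           else PySem.Chars.replace iseg.2 ['.'] [' '])
        else iseg.2)) = pvCombine p (PySem.Int.mod n 2 = 1) parts := by
  intro parts
  induction parts with
  | nil => intro n hn; simp [PySem.List.enumerate_nil, PySem.Chars.join, pvCombine, List.intercalate]
  | cons x xs ih =>
    intro n hn
    rw [PySem.List.enumerate_cons]
    simp only [List.map_cons]
    have hrep : (if PySem.Int.mod n 2 = 1 then
          (if p then PySem.Chars.replace x [' '] ['.'] else PySem.Chars.replace x ['.'] [' '])
        else x) = (if PySem.Int.mod n 2 = 1 then x.map (pvTr p) else x) := by
      by_cases h : PySem.Int.mod n 2 = 1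
      · simp only [if_pos h]
        cases p <;> simp [pvReplace_eq, pvTr]
      · rw [if_neg h, if_neg h]
    cases xs with
    | nil =>
      simp only [PySem.List.enumerate_nil, List.map_nil]
      rw [hrep]
      by_cases h : PySem.Int.mod n 2 = 1 <;>
        simp [PySem.Chars.join, List.intercalate, pvCombine]
    | cons y ys =>
      have hflip : (decide (PySem.Int.mod (n + 1) 2 = 1) : Bool) = !decide (PySem.Int.mod n 2 = 1) := by
        rw [← decide_not, decide_eq_decide]
        simp only [PySem.Int.mod]
        rw [Int.fmod_eq_emod, Int.fmod_eq_emod]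
        constructor <;> intro hh <;> omega
      have hjoin : ∀ (z : List Char) (w : List Char) (ws : List (List Char)),
          PySem.Chars.join ['\''] (z :: w :: ws) = z ++ '\'' :: PySem.Chars.join ['\''] (w :: ws) := by
        intro z w ws; simp [PySem.Chars.join, List.intercalate, List.intersperse]
      obtain ⟨w, ws, hw⟩ : ∃ w ws, (PySem.List.enumerate (y :: ys) (n + 1)).map (fun iseg =>
          if PySem.Int.mod iseg.1 2 = 1 then
            (if p then PySem.Chars.replace iseg.2 [' '] ['.']
             else PySem.Chars.replace iseg.2 ['.'] [' '])
          else iseg.2) = w :: ws :=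
        ⟨_, _, by rw [PySem.List.enumerate_cons, List.map_cons]⟩
      rw [hw, hjoin, ← hw, ih (n + 1) (by omega), hrep, hflip]
      by_cases h : PySem.Int.mod n 2 = 1 <;> simp [pvCombine]

-- ===== VERDICT (by name: the statement is the Claim_ definition above) =====
theorem process_cmdline_spec : Claim_equal_process_cmdline := by
  intro cmdline p _
  unfold Spec_process_cmdline process_cmdline process_cmdline_alt
  simp only
  rw [pvA_foldl p cmdline.toList false []]
  rw [pvSplitOn_eq, pvJoin_enum p (pvSplit1 '\'' cmdline.toList) 0 (by omega)]
  have h0 : (decide (PySem.Int.mod 0 2 = 1)) = false := by decide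
  rw [h0]
  simp only [List.nil_append]
  rw [pvA_eq_combine p cmdline.toList false]
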